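-- pv_equiv track=rewrite | github.com/wooko5/Algorithm_Test | Programmers_Test/pccp/level2/할인 행사.py | solution
-- ===== SOURCE A (Python) =====
-- import collections
--
-- def solution(want, number, discount):
--     answer = 0
--     fruit = dict()
--
--     for i in range(len(want)):
--         fruit[want[i]] = number[i]
--
--     for i in range(len(discount) - 9):
--         limited_discount = discount[i : i + 10]
--
--         if fruit == collections.Counter(limited_discount):
--             answer += 1
--
--     return answer
-- ===== SOURCE B (Python) =====
-- def solution(want, number, discount):
--     target = {}
--     for i in range(len(want)):
--         target[want[i]] = number[i]
--     # a 10-day window can only equal the target if the wanted counts are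
--     # positive and sum to exactly 10
--     if sum(target.values()) != 10 or any(v <= 0 for v in target.values()):
--         return 0
--     n = len(discount)
--     prefix = {}
--     for k in target:
--         p = [0] * (n + 1)
--         c = 0
--         for j, d in enumerate(discount):
--             if d == k:
--                 c += 1
--             p[j + 1] = c
--         prefix[k] = p
--     answer = 0
--     for i in range(n - 9):
--         if all(prefix[k][i + 10] - prefix[k][i] == v for k, v in target.items()):
--             answer += 1
--     return answer
-- ===== Notes on version B (the rewrite author's own statement) =====
-- stated objective: alternative
-- what changed: Replaces the per-window Counter construction and dict==Counter comparison by per-key prefix-count arrays giving an arithmetic test per window, plus an up-front guard that the wanted counts are positive and sum to exactly 10.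
import Mathlib
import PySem

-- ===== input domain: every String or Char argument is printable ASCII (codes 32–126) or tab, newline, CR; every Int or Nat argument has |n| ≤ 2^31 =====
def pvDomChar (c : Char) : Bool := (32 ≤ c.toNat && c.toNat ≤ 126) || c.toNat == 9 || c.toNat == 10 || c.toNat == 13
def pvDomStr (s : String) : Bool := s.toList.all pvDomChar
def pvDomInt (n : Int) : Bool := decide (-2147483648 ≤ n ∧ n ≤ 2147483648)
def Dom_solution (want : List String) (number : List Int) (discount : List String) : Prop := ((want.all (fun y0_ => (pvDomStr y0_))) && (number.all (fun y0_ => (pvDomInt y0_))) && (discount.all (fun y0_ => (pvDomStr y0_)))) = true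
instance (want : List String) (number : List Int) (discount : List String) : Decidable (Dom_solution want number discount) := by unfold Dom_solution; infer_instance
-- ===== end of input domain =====

-- B replaces the per-window Counter build + dict==Counter comparison by per-key
-- prefix-count arrays with an arithmetic test per window (alternative algorithm).

-- ===== PORT A =====
-- Python's 'fruit == collections.Counter(...)': dict equality ignores insertion
-- order, so it is ported as key-set equality plus agreement of every lookup.
def pvDictEq (d1 d2 : PySem.Dict String Int) : Bool :=
  PySem.Set.equal d1.keys d2.keys && d1.keys.all (fun k => d1.get? k == d2.get? k)

def solution (want : List String) (number : List Int) (discount : List String) : Int :=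
  let fruit := (PySem.List.pyRange 0 want.length 1).foldl
    (fun d i => d.insert (PySem.List.pyGetD want i "") (PySem.List.pyGetD number i 0))
    PySem.Dict.empty
  (PySem.List.pyRange 0 ((discount.length : Int) - 9) 1).foldl
    (fun answer i =>
      if pvDictEq fruit (PySem.Dict.counter (PySem.List.slice discount (some i) (some (i + 10))))
      then answer + 1 else answer)
    0

-- ===== PORT B =====
-- inner loop of Source B's prefix build: append the running count c for each day
def pvStep (k : String) (st : List Int × Int) (d : String) : List Int × Int :=
  let c := if d == k then st.2 + 1 else st.2
  (st.1 ++ [c], c)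

def pvPrefix (k : String) (discount : List String) : List Int :=
  (discount.foldl (pvStep k) (([0] : List Int), (0 : Int))).1

def solution_alt (want : List String) (number : List Int) (discount : List String) : Int :=
  let target := (PySem.List.pyRange 0 want.length 1).foldl
    (fun d i => d.insert (PySem.List.pyGetD want i "") (PySem.List.pyGetD number i 0))
    (PySem.Dict.empty : PySem.Dict String Int)
  if target.values.sum != 10 || target.values.any (fun v => decide (v ≤ 0)) then 0
  else
    let pref := target.keys.foldl (fun d k => d.insert k (pvPrefix k discount))
      (PySem.Dict.empty : PySem.Dict String (List Int))
    (PySem.List.pyRange 0 ((discount.length : Int) - 9) 1).foldl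
      (fun answer i =>
        if target.items.all (fun p =>
            (PySem.List.pyGetD (pref.getD p.1 []) (i + 10) 0
              - PySem.List.pyGetD (pref.getD p.1 []) i 0) == p.2)
        then answer + 1 else answer)
      0

-- ===== PRECONDITION & SPEC =====
-- Pre_ excludes exactly the inputs where A raises IndexError (number[i] for i < len(want));
-- B raises there too.
def Pre_solution (want : List String) (number : List Int) (discount : List String) : Prop :=
  want.length ≤ number.length
instance (want : List String) (number : List Int) (discount : List String) : Decidable (Pre_solution want number discount) := by unfold Pre_solution; infer_instance

def pvWitness_solution : List String × List Int × List String :=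
  (["a"], [10], ["a","a","a","a","a","a","a","a","a","a"])

def Spec_solution (want : List String) (number : List Int) (discount : List String) (out : Int) : Prop := out = solution_alt want number discount
instance (want : List String) (number : List Int) (discount : List String) (out : Int) : Decidable (Spec_solution want number discount out) := by unfold Spec_solution; infer_instance

-- ===== CLAIM (what is proved, stated in full; the proofs are below) =====
def Claim_equal_solution : Prop := ∀ (want : List String) (number : List Int) (discount : List String), Dom_solution want number discount → Pre_solution want number discount → Spec_solution want number discount (solution want number discount)

-- ===== LEMMAS AND PROOFS =====

-- generic fold/all congruences on members (used to compare the two window loops)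
lemma pvFoldl_congr {α β : Type} (l : List β) : ∀ (f g : α → β → α) (a : α),
    (∀ b x, x ∈ l → f b x = g b x) → l.foldl f a = l.foldl g a := by
  induction l with
  | nil => intro f g a _; rfl
  | cons x l ih =>
    intro f g a h
    simp only [List.foldl_cons]
    rw [h a x (by simp)]
    exact ih f g _ (fun b y hy => h b y (List.mem_cons_of_mem _ hy))

lemma pvFoldl_fixed {α β : Type} (l : List β) (a : α) : l.foldl (fun b _ => b) a = a := by
  induction l with
  | nil => rfl
  | cons x l ih => simpa using ih

lemma pvAll_congr {α : Type} (l : List α) (p q : α → Bool) (h : ∀ x ∈ l, p x = q x) :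
    l.all p = l.all q := by
  induction l with
  | nil => rfl
  | cons x l ih =>
    simp only [List.all_cons]
    rw [h x (by simp), ih (fun y hy => h y (List.mem_cons_of_mem _ hy))]

lemma countP_cons_mem (w : List String) (k : String) (ks : List String) (hk : k ∉ ks) :
    w.countP (fun x => decide (x ∈ k :: ks)) = w.count k + w.countP (fun x => decide (x ∈ ks)) := by
  induction w with
  | nil => simp
  | cons x w ih =>
    simp only [List.countP_cons, List.count_cons, ih]
    by_cases hx : x = k
    · subst hx
      have hx2 : x ∉ ks := hk
      simp [hx2]
      omega
    · by_cases hx2 : x ∈ ks <;> simp [hx, hx2, List.mem_cons] <;> omega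

lemma sum_counts (w : List String) (ks : List String) (hnd : ks.Nodup) :
    (ks.map (fun k => (w.count k : Int))).sum = (w.countP (fun x => decide (x ∈ ks)) : Int) := by
  induction ks with
  | nil => simp
  | cons k ks ih =>
    rw [List.nodup_cons] at hnd
    simp only [List.map_cons, List.sum_cons]
    rw [ih hnd.2, countP_cons_mem w k ks hnd.1]
    push_cast
    ring

lemma get?_counter (w : List String) (k : String) :
    (PySem.Dict.counter w).get? k = if k ∈ w then some ((w.count k : Int)) else none := by
  by_cases hw : k ∈ w
  · rw [if_pos hw]
    apply PySem.Dict.get?_of_mem_items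
    · rw [PySem.Dict.items_counter]
      exact List.mem_map_of_mem (by rw [PySem.Set.mem_ofList]; exact hw)
    · exact PySem.Dict.nodup_keys_counter w
  · rw [if_neg hw]
    rw [PySem.Dict.get?_eq_none_iff_not_mem_keys]
    rw [PySem.Dict.keys_counter]
    rw [PySem.Set.mem_ofList]
    exact hw

-- the heart: Python's fruit == Counter(w) holds iff the wanted counts are positive,
-- sum to len(w), and each wanted fruit occurs exactly its wanted number of times in w
lemma dictEq_counter_iff (t : PySem.Dict String Int) (w : List String) (hnd : t.keys.Nodup) :
    pvDictEq t (PySem.Dict.counter w) = true ↔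
      (t.values.sum = (w.length : Int)
        ∧ (∀ p ∈ t.items, 0 < p.2)
        ∧ (∀ p ∈ t.items, (w.count p.1 : Int) = p.2)) := by
  constructor
  · intro h
    unfold pvDictEq at h
    rw [Bool.and_eq_true] at h
    obtain ⟨hkeys, hvals⟩ := h
    rw [PySem.Set.equal_iff] at hkeys
    have hkw : ∀ x, x ∈ t.keys ↔ x ∈ w := by
      intro x
      rw [hkeys x, PySem.Dict.keys_counter, PySem.Set.mem_ofList]
    rw [List.all_eq_true] at hvals
    have hget : ∀ k ∈ t.keys, t.get? k = some ((w.count k : Int)) := by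
      intro k hkmem
      have h1 := hvals k hkmem
      rw [beq_iff_eq] at h1
      rw [h1, get?_counter, if_pos ((hkw k).1 hkmem)]
    have hcnt : ∀ p ∈ t.items, (w.count p.1 : Int) = p.2 := by
      intro p hp
      have hk : p.1 ∈ t.keys := PySem.Dict.mem_keys_of_mem_items t hp
      have h2 : t.get? p.1 = some p.2 := PySem.Dict.get?_of_mem_items t hp hnd
      rw [hget p.1 hk] at h2
      exact Option.some.inj h2
    refine ⟨?_, ?_, hcnt⟩
    · rw [PySem.Dict.values_eq_map_keys t hnd 0]
      have hgd : ∀ k ∈ t.keys, t.getD k 0 = (w.count k : Int) := by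
        intro k hk
        rw [PySem.Dict.getD_eq_get?_getD, hget k hk]
        rfl
      rw [List.map_congr_left hgd, sum_counts w t.keys hnd]
      congr 1
      exact List.countP_eq_length.mpr (fun x hx => by simpa using (hkw x).2 hx)
    · intro p hp
      have hk : p.1 ∈ t.keys := PySem.Dict.mem_keys_of_mem_items t hp
      have h1 : (w.count p.1 : Int) = p.2 := hcnt p hp
      have h2 : 0 < w.count p.1 := List.count_pos_iff.mpr ((hkw p.1).1 hk)
      omega
  · rintro ⟨hsum, hpos, hcnt⟩
    have hitems := PySem.Dict.items_eq_map_keys t hnd 0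
    have hgetD : ∀ k ∈ t.keys, (w.count k : Int) = t.getD k 0 := by
      intro k hk
      exact hcnt (k, t.getD k 0) (by rw [hitems]; exact List.mem_map_of_mem hk)
    have hposD : ∀ k ∈ t.keys, 0 < t.getD k 0 := by
      intro k hk
      exact hpos (k, t.getD k 0) (by rw [hitems]; exact List.mem_map_of_mem hk)
    have hksub : ∀ k ∈ t.keys, k ∈ w := by
      intro k hk
      have h1 := hgetD k hk
      have h2 := hposD k hk
      have h3 : 0 < w.count k := by omega
      exact List.count_pos_iff.mp h3
    have hwsub : ∀ x ∈ w, x ∈ t.keys := by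
      have h4 : (t.keys.map (fun k => (w.count k : Int))).sum = (w.length : Int) := by
        rw [List.map_congr_left hgetD, ← PySem.Dict.values_eq_map_keys t hnd 0]
        exact hsum
      rw [sum_counts w t.keys hnd] at h4
      have hlen : w.countP (fun x => decide (x ∈ t.keys)) = w.length := by exact_mod_cast h4
      intro x hx
      simpa using List.countP_eq_length.mp hlen x hx
    unfold pvDictEq
    rw [Bool.and_eq_true]
    constructor
    · rw [PySem.Set.equal_iff]
      intro x
      rw [PySem.Dict.keys_counter, PySem.Set.mem_ofList]
      exact ⟨hksub x, hwsub x⟩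
    · rw [List.all_eq_true]
      intro k hk
      rw [beq_iff_eq, get?_counter, if_pos (hksub k hk)]
      rw [hgetD k hk]
      have hmem : (k, t.getD k 0) ∈ t.items := by
        rw [hitems]; exact List.mem_map_of_mem hk
      exact (PySem.Dict.get?_eq_some_iff_mem_items t _ _ hnd).mpr hmem

lemma pvPrefix_spec (k : String) : ∀ (xs : List String) (acc : List Int) (c : Int),
    (xs.foldl (pvStep k) (acc, c)).1
      = acc ++ (List.range xs.length).map (fun j => c + ((xs.take (j+1)).count k : Int)) := by
  intro xs
  induction xs with
  | nil => intro acc c; simp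
  | cons x xs ih =>
    intro acc c
    simp only [List.foldl_cons, pvStep]
    rw [ih]
    rw [List.length_cons, List.range_succ_eq_map]
    simp only [List.map_cons, List.map_map, List.append_assoc, List.singleton_append]
    congr 1
    congr 1
    · by_cases h : x = k <;>
        simp [h, List.take_succ_cons, List.take_zero, List.count_cons, List.count_nil]
    · apply List.map_congr_left
      intro j _
      by_cases h : x = k <;>
        simp [h, Function.comp, List.take_succ_cons, List.count_cons] <;>
        push_cast <;> ring

lemma pvPrefix_getD (k : String) (discount : List String) (j : Nat) (hj : j ≤ discount.length) :
    (pvPrefix k discount).getD j 0 = ((discount.take j).count k : Int) := by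
  unfold pvPrefix
  rw [pvPrefix_spec]
  cases j with
  | zero => simp
  | succ m =>
    have hm : m < discount.length := by omega
    rw [List.singleton_append, List.getD_cons_succ]
    rw [List.getD_eq_getElem _ _ (by simpa using hm)]
    simp [hm]

lemma getD_fold_insert_fun (f : String → List Int) : ∀ (ks : List String) (d : PySem.Dict String (List Int)) (k : String),
    ((ks.foldl (fun d k => d.insert k (f k)) d).getD k []) = if k ∈ ks then f k else d.getD k [] := by
  intro ks
  induction ks with
  | nil => intro d k; simp
  | cons k' ks ih =>
    intro d k
    simp only [List.foldl_cons]
    rw [ih]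
    by_cases h1 : k ∈ ks
    · simp [h1]
    · by_cases h2 : k = k'
      · subst h2
        simp [h1, PySem.Dict.getD_insert_self]
      · simp [h1, h2, PySem.Dict.getD_insert]

-- the window discount[i:i+10] for a natural start index
lemma window_eq (xs : List String) (j : Nat) :
    PySem.List.slice xs (some (j : Int)) (some ((j : Int) + 10)) = (xs.drop j).take 10 := by
  have h10 : ((j : Int) + 10) = ((j : Int) + ((10 : Nat) : Int)) := by norm_num
  rw [h10, PySem.List.slice_natCast_add]

lemma count_window (xs : List String) (j : Nat) (k : String) :
    (((xs.drop j).take 10).count k : Int)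
      = ((xs.take (j+10)).count k : Int) - ((xs.take j).count k : Int) := by
  have h : xs.take (j+10) = xs.take j ++ (xs.drop j).take 10 := List.take_add
  rw [h, List.count_append]
  push_cast
  ring

-- main lemma: with the same target dict on both sides, A's window loop equals
-- B's guard + prefix-array loop
lemma main_eq (t : PySem.Dict String Int) (discount : List String) (hnd : t.keys.Nodup) :
    (PySem.List.pyRange 0 ((discount.length : Int) - 9) 1).foldl
      (fun answer i =>
        if pvDictEq t (PySem.Dict.counter (PySem.List.slice discount (some i) (some (i + 10))))
        then answer + 1 else answer) (0 : Int)
    = if t.values.sum != 10 || t.values.any (fun v => decide (v ≤ 0)) then 0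
      else
        (PySem.List.pyRange 0 ((discount.length : Int) - 9) 1).foldl
          (fun answer i =>
            if t.items.all (fun p =>
                (PySem.List.pyGetD ((t.keys.foldl (fun d k => d.insert k (pvPrefix k discount))
                    (PySem.Dict.empty : PySem.Dict String (List Int))).getD p.1 []) (i + 10) 0
                  - PySem.List.pyGetD ((t.keys.foldl (fun d k => d.insert k (pvPrefix k discount))
                    (PySem.Dict.empty : PySem.Dict String (List Int))).getD p.1 []) i 0) == p.2)
            then answer + 1 else answer) (0 : Int) := by
  have hvals_def : t.values = t.items.map (fun p => p.2) := rfl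
  have hwin : ∀ i : Int, i ∈ PySem.List.pyRange 0 ((discount.length : Int) - 9) 1 →
      ∃ j : Nat, i = (j : Int) ∧ j + 10 ≤ discount.length := by
    intro i hi
    rw [PySem.List.mem_pyRange_one] at hi
    refine ⟨i.toNat, (Int.toNat_of_nonneg hi.1).symm, ?_⟩
    omega
  by_cases hguard : (t.values.sum != 10 || t.values.any (fun v => decide (v ≤ 0))) = true
  · -- guard fires: B returns 0 and no window can match A's dict
    rw [if_pos hguard]
    have hbad : ¬ (t.values.sum = 10 ∧ ∀ p ∈ t.items, 0 < p.2) := by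
      rintro ⟨h1, h2⟩
      rw [Bool.or_eq_true] at hguard
      rcases hguard with h | h
      · simp [h1] at h
      · rw [List.any_eq_true] at h
        obtain ⟨v, hv, hvle⟩ := h
        rw [hvals_def] at hv
        obtain ⟨p, hp, hpv⟩ := List.mem_map.mp hv
        rw [← hpv] at hvle
        simp at hvle
        have := h2 p hp
        omega
    have hbody : ∀ (b i : Int), i ∈ PySem.List.pyRange 0 ((discount.length : Int) - 9) 1 →
        (if pvDictEq t (PySem.Dict.counter (PySem.List.slice discount (some i) (some (i + 10))))
          then b + 1 else b) = b := by
      intro b i hi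
      obtain ⟨j, rfl, hj⟩ := hwin i hi
      rw [window_eq]
      have hfalse : pvDictEq t (PySem.Dict.counter ((discount.drop j).take 10)) = false := by
        rw [Bool.eq_false_iff]
        intro htrue
        obtain ⟨hsum, hpos, _⟩ := (dictEq_counter_iff t _ hnd).mp htrue
        have hlen : ((discount.drop j).take 10).length = 10 := by
          simp only [List.length_take, List.length_drop]
          omega
        rw [hlen] at hsum
        exact hbad ⟨by exact_mod_cast hsum, hpos⟩
      rw [hfalse]
      simp
    rw [pvFoldl_congr _ _ (fun b _ => b) 0 hbody, pvFoldl_fixed]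
  · -- guard passes: the wanted counts are positive and sum to 10
    rw [if_neg hguard]
    have hsum : t.values.sum = 10 := by
      by_contra hne
      apply hguard
      rw [Bool.or_eq_true]
      exact Or.inl (by simpa [bne_iff_ne] using hne)
    have hpos : ∀ p ∈ t.items, 0 < p.2 := by
      intro p hp
      by_contra hle
      push_neg at hle
      apply hguard
      rw [Bool.or_eq_true]
      right
      rw [List.any_eq_true]
      refine ⟨p.2, by rw [hvals_def]; exact List.mem_map_of_mem hp, by simpa using hle⟩
    apply pvFoldl_congr
    intro b i hi
    obtain ⟨j, rfl, hj⟩ := hwin i hi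
    rw [window_eq]
    have hlen : ((discount.drop j).take 10).length = 10 := by
      simp only [List.length_take, List.length_drop]
      omega
    have hA : pvDictEq t (PySem.Dict.counter ((discount.drop j).take 10))
        = t.items.all (fun p => ((((discount.drop j).take 10).count p.1 : Int) == p.2)) := by
      rw [Bool.eq_iff_iff, dictEq_counter_iff t _ hnd, List.all_eq_true]
      constructor
      · rintro ⟨_, _, hc⟩ p hp
        rw [beq_iff_eq]
        exact hc p hp
      · intro hc
        refine ⟨by rw [hlen]; exact_mod_cast hsum, hpos, fun p hp => ?_⟩
        have h1 := hc p hp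
        rwa [beq_iff_eq] at h1
    have hcond : ∀ p ∈ t.items,
        ((PySem.List.pyGetD ((t.keys.foldl (fun d k => d.insert k (pvPrefix k discount))
            (PySem.Dict.empty : PySem.Dict String (List Int))).getD p.1 []) ((j : Int) + 10) 0
          - PySem.List.pyGetD ((t.keys.foldl (fun d k => d.insert k (pvPrefix k discount))
            (PySem.Dict.empty : PySem.Dict String (List Int))).getD p.1 []) (j : Int) 0) == p.2)
        = ((((discount.drop j).take 10).count p.1 : Int) == p.2) := by
      intro p hp
      have hpref : ((t.keys.foldl (fun d k => d.insert k (pvPrefix k discount))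
          (PySem.Dict.empty : PySem.Dict String (List Int))).getD p.1 [])
            = pvPrefix p.1 discount := by
        rw [getD_fold_insert_fun (fun k => pvPrefix k discount) t.keys PySem.Dict.empty p.1]
        rw [if_pos (PySem.Dict.mem_keys_of_mem_items t hp)]
      rw [hpref]
      have e1 : ((j : Int) + 10) = (((j + 10 : Nat) : Nat) : Int) := by push_cast; ring
      rw [e1, PySem.List.pyGetD_natCast, PySem.List.pyGetD_natCast]
      rw [pvPrefix_getD _ _ _ (by omega), pvPrefix_getD _ _ _ (by omega)]
      rw [count_window]
    rw [hA, pvAll_congr t.items _ _ hcond]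

-- ===== VERDICT (by name: the statement is the Claim_ definition above) =====
theorem solution_spec : Claim_equal_solution := by
  intro want number discount _ _
  unfold Spec_solution solution solution_alt
  have hnd : ((PySem.List.pyRange 0 want.length 1).foldl
      (fun d i => d.insert (PySem.List.pyGetD want i "") (PySem.List.pyGetD number i 0))
      (PySem.Dict.empty : PySem.Dict String Int)).keys.Nodup :=
    PySem.Dict.nodup_keys_foldl_insert_key (PySem.List.pyRange 0 want.length 1)
      (fun i => PySem.List.pyGetD want i "") (fun _ i => PySem.List.pyGetD number i 0)
      PySem.Dict.empty PySem.Dict.nodup_keys_empty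
  exact main_eq _ discount hnd
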